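-- pv_equiv track=rewrite | github.com/jpegame/Atividades_ADS | lista_recurssão/ex15.py | verifica_listas_iguais
-- ===== SOURCE A (Python) =====
-- def contar_positivos_negativos(sublista):
--     positivos = sum(1 for num in sublista if num > 0)
--     negativos = sum(1 for num in sublista if num < 0)
--     return positivos, negativos
--
-- def verifica_listas_iguais(w):
--     if not w:
--         return True
--     else:
--         sublista = w[0]
--         positivos, negativos = contar_positivos_negativos(sublista)
--         if positivos != negativos:
--             return False
--         else:
--             return verifica_listas_iguais(w[1:])
-- ===== SOURCE B (Python) =====
-- def verifica_listas_iguais(w):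
--     return all(sum((n > 0) - (n < 0) for n in s) == 0 for s in w)
-- ===== Notes on version B (the rewrite author's own statement) =====
-- stated objective: simpler
-- what changed: Replaced the tail recursion on w[1:] and the two-pass positive/negative counting helper by a single all(...) over w that checks each sublist's signed sum (n>0)-(n<0) is zero in one pass.
import Mathlib
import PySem

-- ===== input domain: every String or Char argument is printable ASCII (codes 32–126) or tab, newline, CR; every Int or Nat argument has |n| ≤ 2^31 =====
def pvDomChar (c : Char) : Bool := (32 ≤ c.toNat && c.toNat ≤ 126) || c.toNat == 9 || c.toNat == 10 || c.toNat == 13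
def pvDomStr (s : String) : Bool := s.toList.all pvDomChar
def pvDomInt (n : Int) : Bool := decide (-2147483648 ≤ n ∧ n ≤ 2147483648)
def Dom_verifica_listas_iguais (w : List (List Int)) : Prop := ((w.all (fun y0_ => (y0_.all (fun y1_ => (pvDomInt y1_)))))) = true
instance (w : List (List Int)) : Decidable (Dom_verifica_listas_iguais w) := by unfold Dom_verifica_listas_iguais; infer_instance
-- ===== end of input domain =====

-- B replaces A's tail recursion and two-count helper by one all(...) pass checking each sublist's signed sum is zero (objective: simpler).
-- ===== PORT A =====
def contar_positivos_negativos (sublista : List Int) : Int × Int :=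
  (sublista.foldl (fun a num => if num > 0 then a + 1 else a) 0,
   sublista.foldl (fun a num => if num < 0 then a + 1 else a) 0)

def verifica_listas_iguais : List (List Int) → Bool
  | [] => true
  | sublista :: rest =>
    let pn := contar_positivos_negativos sublista
    if pn.1 ≠ pn.2 then false else verifica_listas_iguais rest

-- ===== PORT B =====
def verifica_listas_iguais_alt (w : List (List Int)) : Bool :=
  w.all (fun s => s.foldl (fun a n => a + ((if n > 0 then (1:Int) else 0) - (if n < 0 then 1 else 0))) 0 == 0)

-- ===== PRECONDITION & SPEC =====
def Spec_verifica_listas_iguais (w : List (List Int)) (out : Bool) : Prop := out = verifica_listas_iguais_alt w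
instance (w : List (List Int)) (out : Bool) : Decidable (Spec_verifica_listas_iguais w out) := by unfold Spec_verifica_listas_iguais; infer_instance

-- ===== CLAIM (what is proved, stated in full; the proofs are below) =====
def Claim_equal_verifica_listas_iguais : Prop := ∀ (w : List (List Int)), Dom_verifica_listas_iguais w → Spec_verifica_listas_iguais w (verifica_listas_iguais w)

-- ===== LEMMAS AND PROOFS =====

lemma pos_shift (s : List Int) (a : Int) :
    s.foldl (fun a num => if num > 0 then a + 1 else a) a
      = a + s.foldl (fun a num => if num > 0 then a + 1 else a) 0 := by
  induction s generalizing a with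
  | nil => simp
  | cons x t ih =>
    simp only [List.foldl_cons]
    rw [ih, ih (if x > 0 then (0:Int) + 1 else 0)]
    split_ifs <;> ring

lemma neg_shift (s : List Int) (a : Int) :
    s.foldl (fun a num => if num < 0 then a + 1 else a) a
      = a + s.foldl (fun a num => if num < 0 then a + 1 else a) 0 := by
  induction s generalizing a with
  | nil => simp
  | cons x t ih =>
    simp only [List.foldl_cons]
    rw [ih, ih (if x < 0 then (0:Int) + 1 else 0)]
    split_ifs <;> ring

lemma signed_eq (s : List Int) (a : Int) :
    s.foldl (fun a n => a + ((if n > 0 then (1:Int) else 0) - (if n < 0 then 1 else 0))) a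
      = a + s.foldl (fun a num => if num > 0 then a + 1 else a) 0
          - s.foldl (fun a num => if num < 0 then a + 1 else a) 0 := by
  induction s generalizing a with
  | nil => simp
  | cons x t ih =>
    simp only [List.foldl_cons]
    rw [ih, pos_shift t (if x > 0 then (0:Int) + 1 else 0),
        neg_shift t (if x < 0 then (0:Int) + 1 else 0)]
    split_ifs <;> ring

-- ===== VERDICT (by name: the statement is the Claim_ definition above) =====
theorem verifica_listas_iguais_spec : Claim_equal_verifica_listas_iguais := by
  unfold Claim_equal_verifica_listas_iguais
  intro w hdom
  unfold Spec_verifica_listas_iguais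
  induction w with
  | nil => rfl
  | cons s rest ih =>
    simp only [Dom_verifica_listas_iguais, List.all_cons, Bool.and_eq_true] at hdom
    simp only [verifica_listas_iguais, verifica_listas_iguais_alt, List.all_cons,
      contar_positivos_negativos]
    rw [ih hdom.2]
    unfold verifica_listas_iguais_alt
    rw [signed_eq s 0]
    by_cases h : List.foldl (fun a num => if num > 0 then a + 1 else a) (0:Int) s
        = List.foldl (fun a num => if num < 0 then a + 1 else a) (0:Int) s
    · simp [h]
    · rw [if_pos h]
      symm
      simp only [Bool.and_eq_false_iff]
      left
      simp only [beq_eq_false_iff_ne, ne_eq]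
      omega
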